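-- pv_equiv track=rewrite | github.com/Smithash/Artificial-Intelligence | lab 4/lab4_3.py | word_cleaning
-- ===== SOURCE A (Python) =====
-- def word_cleaning(text):
--     cleaned_text = ''
--
--     for char in text:
--         #Checking if whitespace or alphabet
--         if char.isalpha() or char.isspace():
--             #add to cleaned_text
--             cleaned_text += char
--
--     words = cleaned_text.split()
--     words = [word.lower() for word in words] #converts to lower case
--
--     return words
-- ===== SOURCE B (Python) =====
-- def word_cleaning(text):
--     result = []
--     for token in text.split():
--         word = ''.join(c for c in token if c.isalpha()).lower()
--         if word:
--             result.append(word)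
--     return result
-- ===== Notes on version B (the rewrite author's own statement) =====
-- stated objective: alternative
-- what changed: B splits the raw text into whitespace tokens first and cleans each token (strip non-alpha, lowercase, drop tokens that become empty), instead of A's build-one-global-filtered-string-then-split decomposition.
import Mathlib
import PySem

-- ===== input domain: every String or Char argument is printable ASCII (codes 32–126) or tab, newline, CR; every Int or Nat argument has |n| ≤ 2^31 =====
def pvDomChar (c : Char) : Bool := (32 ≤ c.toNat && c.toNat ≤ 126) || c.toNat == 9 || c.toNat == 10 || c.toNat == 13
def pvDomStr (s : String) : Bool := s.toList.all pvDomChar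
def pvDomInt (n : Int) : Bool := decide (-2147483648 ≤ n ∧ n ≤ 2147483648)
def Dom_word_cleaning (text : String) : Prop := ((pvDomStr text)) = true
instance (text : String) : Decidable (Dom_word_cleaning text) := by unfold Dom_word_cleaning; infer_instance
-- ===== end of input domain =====

-- B cleans per whitespace token (strip non-alpha, lowercase, drop tokens that become empty)
-- instead of A's global filter-then-split; a different decomposition of the same task.

-- ===== PORT A =====
def word_cleaning (text : String) : List String :=
  let cleaned : List Char := text.toList.foldl
    (fun acc c => if PySem.Chars.isalpha c || PySem.Chars.isspace c then acc ++ [c] else acc) []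
  let words := PySem.Chars.split₀ cleaned
  words.map (fun w => String.ofList (PySem.Chars.lower w))

-- ===== PORT B =====
def word_cleaning_alt (text : String) : List String :=
  (PySem.Chars.split₀ text.toList).foldl
    (fun acc tok =>
      let w := PySem.Chars.lower (tok.filter PySem.Chars.isalpha)
      if w ≠ [] then acc ++ [String.ofList w] else acc) []

-- ===== PRECONDITION & SPEC =====
def Spec_word_cleaning (text : String) (out : List String) : Prop := out = word_cleaning_alt text
instance (text : String) (out : List String) : Decidable (Spec_word_cleaning text out) := by unfold Spec_word_cleaning; infer_instance

-- ===== CLAIM (what is proved, stated in full; the proofs are below) =====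
def Claim_equal_word_cleaning : Prop := ∀ (text : String), Dom_word_cleaning text → Spec_word_cleaning text (word_cleaning text)

-- ===== LEMMAS AND PROOFS =====

-- a whitespace character is never a letter (Python's isalpha is ASCII letters here)
lemma alpha_of_space {c : Char} (h : PySem.Chars.isspace c = true) :
    PySem.Chars.isalpha c = false := by
  simp only [PySem.Chars.isspace, Bool.or_eq_true, Bool.and_eq_true, decide_eq_true_eq] at h
  simp only [PySem.Chars.isalpha, PySem.Chars.isupper, PySem.Chars.islower,
    Bool.or_eq_false_iff, Bool.and_eq_false_iff, decide_eq_false_iff_not,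
    Char.le_def, UInt32.le_iff_toNat_le] at *
  simp only [Char.toNat] at *
  have hA : ('A').val.toNat = 65 := rfl
  have hZ : ('Z').val.toNat = 90 := rfl
  have ha : ('a').val.toNat = 97 := rfl
  have hz : ('z').val.toNat = 122 := rfl
  omega

-- the split₀ loop's accumulator only collects finished words, in reverse
lemma go_acc (cs : List Char) : ∀ cur acc,
    PySem.Chars.split₀.go cs cur acc = acc.reverse ++ PySem.Chars.split₀.go cs cur [] := by
  induction cs with
  | nil =>
    intro cur acc
    simp only [PySem.Chars.split₀.go]
    split_ifs <;> simp
  | cons c rest ih =>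
    intro cur acc
    simp only [PySem.Chars.split₀.go]
    split_ifs with h1 h2
    · rw [ih [] acc]
    · rw [ih [] (cur.reverse :: acc), ih [] [cur.reverse]]
      simp
    · rw [ih (c :: cur) acc]

-- core invariant: filtering non-alpha/space first, then splitting, equals splitting first,
-- then stripping non-alpha per word and dropping the words that become empty
lemma go_main (cs : List Char) : ∀ cur, (∀ c ∈ cur, PySem.Chars.isspace c = false) →
    PySem.Chars.split₀.go
      (cs.filter (fun c => PySem.Chars.isalpha c || PySem.Chars.isspace c))
      (cur.filter PySem.Chars.isalpha) []
    = ((PySem.Chars.split₀.go cs cur []).map (·.filter PySem.Chars.isalpha)).filter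
        (fun w => !w.isEmpty) := by
  induction cs with
  | nil =>
    intro cur _
    simp only [List.filter_nil, PySem.Chars.split₀.go]
    by_cases hc : (cur.filter PySem.Chars.isalpha) = []
    · simp [hc]
    · have hcur : cur.isEmpty = false := by
        rcases cur with _ | _ <;> simp_all
      simp [hc, hcur, List.filter_reverse, List.isEmpty_iff]
  | cons c rest ih =>
    intro cur hcur
    by_cases hs : PySem.Chars.isspace c = true
    · have ha : PySem.Chars.isalpha c = false := alpha_of_space hs
      have hkeep : (PySem.Chars.isalpha c || PySem.Chars.isspace c) = true := by simp [hs]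
      simp only [List.filter_cons, hkeep, if_true]
      simp only [PySem.Chars.split₀.go, hs, if_true]
      have hrest := ih [] (by simp)
      simp only [List.filter_nil] at hrest
      by_cases hce : cur = []
      · subst hce
        simpa using hrest
      · have hcee : cur.isEmpty = false := by simp [hce]
        by_cases hc : (cur.filter PySem.Chars.isalpha) = []
        · simp only [hc, List.isEmpty_nil, if_true, hcee, Bool.false_eq_true, if_false]
          rw [go_acc rest [] [cur.reverse], hrest]
          have hrf : (cur.reverse.filter PySem.Chars.isalpha) = [] := by
            simp [List.filter_reverse, hc]
          simp [hrf]
        · have hfc : (cur.filter PySem.Chars.isalpha).isEmpty = false := by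
            simp [hc]
          simp only [hfc, Bool.false_eq_true, if_false, hcee]
          rw [go_acc (rest.filter _) [] [(cur.filter PySem.Chars.isalpha).reverse],
              go_acc rest [] [cur.reverse], hrest]
          simp [List.filter_reverse, hc]
    · have hs' : PySem.Chars.isspace c = false := by simp_all
      have hcur' : ∀ x ∈ c :: cur, PySem.Chars.isspace x = false := by
        intro x hx
        rcases List.mem_cons.mp hx with rfl | hx
        · exact hs'
        · exact hcur x hx
      by_cases ha : PySem.Chars.isalpha c = true
      · have hkeep : (PySem.Chars.isalpha c || PySem.Chars.isspace c) = true := by simp [ha]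
        simp only [List.filter_cons, hkeep, if_true]
        simp only [PySem.Chars.split₀.go, hs', Bool.false_eq_true, if_false]
        have := ih (c :: cur) hcur'
        simp only [List.filter_cons, ha, if_true] at this
        exact this
      · have ha' : PySem.Chars.isalpha c = false := by simp_all
        have hkeep : (PySem.Chars.isalpha c || PySem.Chars.isspace c) = false := by
          simp [ha', hs']
        simp only [List.filter_cons, hkeep, Bool.false_eq_true, if_false]
        simp only [PySem.Chars.split₀.go, hs', Bool.false_eq_true, if_false]
        have := ih (c :: cur) hcur'
        simp only [List.filter_cons, ha', Bool.false_eq_true, if_false] at this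
        exact this

lemma split₀_filter (cs : List Char) :
    PySem.Chars.split₀ (cs.filter (fun c => PySem.Chars.isalpha c || PySem.Chars.isspace c))
    = ((PySem.Chars.split₀ cs).map (·.filter PySem.Chars.isalpha)).filter (fun w => !w.isEmpty) := by
  have := go_main cs [] (by simp)
  simpa [PySem.Chars.split₀] using this

-- B's append loop as a filter-then-map
lemma alt_foldl (l : List (List Char)) : ∀ acc : List String,
    l.foldl (fun acc tok =>
      let w := PySem.Chars.lower (tok.filter PySem.Chars.isalpha)
      if w ≠ [] then acc ++ [String.ofList w] else acc) acc
    = acc ++ (l.filter (fun tok => !(tok.filter PySem.Chars.isalpha).isEmpty)).map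
        (fun tok => String.ofList (PySem.Chars.lower (tok.filter PySem.Chars.isalpha))) := by
  induction l with
  | nil => intro acc; simp
  | cons tok rest ih =>
    intro acc
    simp only [List.foldl_cons, List.filter_cons]
    simp only [ne_eq, ite_not] at ih ⊢
    by_cases h : (tok.filter PySem.Chars.isalpha) = []
    · have hl : PySem.Chars.lower (tok.filter PySem.Chars.isalpha) = [] := by
        simp [PySem.Chars.lower, h]
      have h2 : (tok.filter PySem.Chars.isalpha).isEmpty = true := by
        simp [h]
      simp [hl, h2, ih]
    · have hl : (PySem.Chars.lower (tok.filter PySem.Chars.isalpha) = []) = False := by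
        simp [PySem.Chars.lower, h]
      have h2 : (tok.filter PySem.Chars.isalpha).isEmpty = false := by
        simp [h]
      simp [hl, h2, ih]

-- ===== VERDICT (by name: the statement is the Claim_ definition above) =====
theorem word_cleaning_spec : Claim_equal_word_cleaning := by
  intro text _
  unfold Spec_word_cleaning word_cleaning word_cleaning_alt
  rw [PySem.List.foldl_append_if_eq_filter]
  simp only [List.nil_append, split₀_filter]
  rw [alt_foldl, List.filter_map, List.map_map]
  simp [Function.comp_def]
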